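-- pv_equiv track=rewrite | github.com/nsgxi43/Reta-AI | rules/filters.py | prefer_size
-- ===== SOURCE A (Python) =====
-- def prefer_size(products, preferred_size):
--     """
--     Reorders products so preferred size appears first if present.
--     Does not remove other products.
--     """
--     if not preferred_size:
--         return products
--
--     exact = []
--     others = []
--
--     for p in products:
--         size = p.get("size_variant", "")
--         if preferred_size.lower() in size.lower():
--             exact.append(p)
--         else:
--             others.append(p)
--
--     return exact + others
-- ===== SOURCE B (Python) =====
-- def prefer_size(products, preferred_size):
--     """
--     Reorders products so preferred size appears first if present.
--     Does not remove other products.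
--     """
--     if not preferred_size:
--         return products
--     return sorted(
--         products,
--         key=lambda p: preferred_size.lower() not in p.get("size_variant", "").lower(),
--     )
-- ===== Notes on version B (the rewrite author's own statement) =====
-- stated objective: idiomatic
-- what changed: Replaced the two-accumulator partition loop and list concatenation with a single stable sort on a boolean key (non-matches sort after matches; stability preserves relative order within each group).
import Mathlib
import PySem

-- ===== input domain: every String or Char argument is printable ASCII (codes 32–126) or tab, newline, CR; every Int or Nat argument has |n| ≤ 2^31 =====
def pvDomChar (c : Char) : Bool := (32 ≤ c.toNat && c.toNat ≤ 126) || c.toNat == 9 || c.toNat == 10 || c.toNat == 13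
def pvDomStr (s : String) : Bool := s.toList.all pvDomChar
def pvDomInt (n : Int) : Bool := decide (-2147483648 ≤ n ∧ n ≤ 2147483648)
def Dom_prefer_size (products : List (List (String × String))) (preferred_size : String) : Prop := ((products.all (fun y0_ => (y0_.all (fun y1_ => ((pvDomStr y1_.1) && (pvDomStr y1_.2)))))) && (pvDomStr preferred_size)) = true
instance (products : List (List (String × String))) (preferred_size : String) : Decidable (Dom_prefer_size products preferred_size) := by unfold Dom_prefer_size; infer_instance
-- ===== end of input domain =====

-- B replaces A's two-accumulator partition loop with a single stable sort on a boolean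
-- "does not match" key (idiomatic; same return value, no speed claim).


-- ===== PORT A =====
def prefer_size (products : List (List (String × String))) (preferred_size : String) : List (List (String × String)) :=
  if preferred_size = "" then products
  else
    -- exact = []; others = []; for p in products: …  (two accumulators)
    let r := products.foldl
      (fun (acc : List (List (String × String)) × List (List (String × String))) p =>
        if PySem.Str.isIn (PySem.Str.lower preferred_size)
             (PySem.Str.lower (PySem.Dict.getD (PySem.Dict.mk p) "size_variant" "")) then
          (acc.1 ++ [p], acc.2)
        else
          (acc.1, acc.2 ++ [p]))
      ([], [])
    r.1 ++ r.2

-- ===== PORT B =====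
def prefer_size_alt (products : List (List (String × String))) (preferred_size : String) : List (List (String × String)) :=
  if preferred_size = "" then products
  else
    PySem.List.sorted products
      (fun p => !PySem.Str.isIn (PySem.Str.lower preferred_size)
                  (PySem.Str.lower (PySem.Dict.getD (PySem.Dict.mk p) "size_variant" "")))
      false

-- ===== PRECONDITION & SPEC =====
def Spec_prefer_size (products : List (List (String × String))) (preferred_size : String) (out : List (List (String × String))) : Prop := out = prefer_size_alt products preferred_size
instance (products : List (List (String × String))) (preferred_size : String) (out : List (List (String × String))) : Decidable (Spec_prefer_size products preferred_size out) := by unfold Spec_prefer_size; infer_instance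

-- ===== CLAIM (what is proved, stated in full; the proofs are below) =====
def Claim_equal_prefer_size : Prop := ∀ (products : List (List (String × String))) (preferred_size : String), Dom_prefer_size products preferred_size → Spec_prefer_size products preferred_size (prefer_size products preferred_size)

-- ===== LEMMAS AND PROOFS =====

-- inserting an element whose comparison is false on all of F and true on all of T lands between them
theorem insertBy_between {α : Type} (before : α → α → Bool) (x : α) (F T : List α)
    (hF : ∀ f ∈ F, before x f = false) (hT : ∀ t ∈ T, before x t = true) :
    PySem.List.insertBy before x (F ++ T) = F ++ x :: T := by
  induction F with
  | nil =>
      cases T with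
      | nil => rfl
      | cons t ts => simp [PySem.List.insertBy, hT t (by simp)]
  | cons f F ih =>
      simp only [List.cons_append, PySem.List.insertBy, hF f (by simp)]
      rw [ih (fun g hg => hF g (List.mem_cons_of_mem _ hg))]
      simp

-- insertion sort on a Bool key, started from a partitioned accumulator, keeps it partitioned
theorem foldl_insertBy_bool_partition {α : Type} (key : α → Bool) (xs : List α) :
    ∀ (F T : List α), (∀ f ∈ F, key f = false) → (∀ t ∈ T, key t = true) →
    xs.foldl (fun acc x => PySem.List.insertBy (fun a b => decide (key a < key b)) x acc) (F ++ T)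
      = (F ++ xs.filter (fun x => !key x)) ++ (T ++ xs.filter key) := by
  induction xs with
  | nil => intro F T _ _; simp
  | cons x xs ih =>
      intro F T hF hT
      by_cases h : key x = true
      · have hstep : PySem.List.insertBy (fun a b => decide (key a < key b)) x (F ++ T)
            = F ++ (T ++ [x]) := by
          rw [PySem.List.insertBy_of_forall_not_before]
          · simp
          · intro y _; cases hy : key y <;> simp [h]
        have := ih F (T ++ [x]) hF (by
          intro t ht
          rcases List.mem_append.mp ht with h1 | h1
          · exact hT t h1
          · simp at h1; simpa [h1] using h)
        simp only [List.foldl_cons, hstep, this]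
        simp [h]
      · have h' : key x = false := by simpa using h
        have hstep : PySem.List.insertBy (fun a b => decide (key a < key b)) x (F ++ T)
            = (F ++ [x]) ++ T := by
          rw [insertBy_between]
          · simp
          · intro f hf; simp [h', hF f hf]
          · intro t ht; simp [h', hT t ht]
        have := ih (F ++ [x]) T (by
          intro f hf
          rcases List.mem_append.mp hf with h1 | h1
          · exact hF f h1
          · simp at h1; simpa [h1] using h') hT
        simp only [List.foldl_cons, hstep, this]
        simp [h']

-- a stable sort on a Bool key is exactly "non-keyed elements first, keyed elements after"
theorem sorted_bool_key_eq_partition {α : Type} (xs : List α) (key : α → Bool) :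
    PySem.List.sorted xs key false = xs.filter (fun x => !key x) ++ xs.filter key := by
  have := foldl_insertBy_bool_partition key xs [] [] (by simp) (by simp)
  simpa [PySem.List.sorted_eq_foldl_insertBy] using this

-- A's two-accumulator loop computes the two filters
theorem foldl_partition {α : Type} (c : α → Bool) (xs : List α) :
    ∀ (F T : List α),
    xs.foldl (fun acc p => if c p then (acc.1 ++ [p], acc.2) else (acc.1, acc.2 ++ [p])) (F, T)
      = (F ++ xs.filter c, T ++ xs.filter (fun p => !c p)) := by
  induction xs with
  | nil => intro F T; simp
  | cons x xs ih =>
      intro F T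
      by_cases h : c x = true
      · simp only [List.foldl_cons, h, if_true, List.filter_cons]
        rw [ih]
        simp
      · have h' : c x = false := by simpa using h
        simp only [List.foldl_cons, h', Bool.false_eq_true, if_false, List.filter_cons]
        rw [ih]
        simp

-- ===== VERDICT (by name: the statement is the Claim_ definition above) =====
theorem prefer_size_spec : Claim_equal_prefer_size := by
  intro products preferred_size _
  unfold Spec_prefer_size prefer_size prefer_size_alt
  by_cases hps : preferred_size = ""
  · simp [hps]
  · simp only [hps, if_false]
    rw [sorted_bool_key_eq_partition, foldl_partition]
    simp
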